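-- pv_equiv track=rewrite | github.com/Edimilton/Projeto-e-Analise-de-Algoritmos | Algoritmos Geometricos/Q6.py | coord_ext_esq
-- ===== SOURCE A (Python) =====
-- def coord_ext_esq(coordenadas, n):
--     minimo = 0
--     for i in range(1,n):
--         if coordenadas[i][0] == coordenadas[minimo][0]:
--             if coordenadas[i][1] > coordenadas[minimo][1]:
--                 minimo = i
--         elif coordenadas[i][0] < coordenadas[minimo][0]:
--             minimo = i
--     return minimo
-- ===== SOURCE B (Python) =====
-- def coord_ext_esq(coordenadas, n):
--     if n <= 1:
--         return 0
--     pts = coordenadas[:n]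
--     min_x = min(x for x, _ in pts)
--     best_i = 0
--     best_y = None
--     for i, (x, y) in enumerate(pts):
--         if x == min_x and (best_y is None or y > best_y):
--             best_i = i
--             best_y = y
--     return best_i
-- ===== Notes on version B (the rewrite author's own statement) =====
-- stated objective: alternative
-- what changed: Replaces A's single fused argmin scan keeping a best index and comparing lexicographically on (x, then y) against it, by two separately-scoped linear passes: first compute the minimum x over the first n points, then scan once tracking the earliest index of strictly largest y among points whose x equals that minimum.
import Mathlib
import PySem

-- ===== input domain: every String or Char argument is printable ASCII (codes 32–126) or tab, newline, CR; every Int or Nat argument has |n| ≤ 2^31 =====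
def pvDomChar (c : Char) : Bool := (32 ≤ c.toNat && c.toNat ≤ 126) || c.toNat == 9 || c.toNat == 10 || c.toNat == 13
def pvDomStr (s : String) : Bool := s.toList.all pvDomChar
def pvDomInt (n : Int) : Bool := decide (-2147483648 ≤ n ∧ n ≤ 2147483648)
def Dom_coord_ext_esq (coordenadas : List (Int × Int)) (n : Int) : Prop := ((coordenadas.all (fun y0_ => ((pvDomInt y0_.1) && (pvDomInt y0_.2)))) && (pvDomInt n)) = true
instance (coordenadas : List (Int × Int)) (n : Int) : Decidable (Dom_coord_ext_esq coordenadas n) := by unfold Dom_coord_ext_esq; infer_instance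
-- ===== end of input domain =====

-- B replaces A's single fused lexicographic argmin scan by two passes (min x first, then best y
-- among the min-x points); same O(n) cost, different decomposition ("alternative").

-- ===== PORT A =====
-- Loop body of A; pyGetD's default is never read on inputs admitted by Pre_ (indices 0 ≤ i < n ≤ len).
def stepA (coordenadas : List (Int × Int)) (minimo i : Int) : Int :=
  if (PySem.List.pyGetD coordenadas i (0, 0)).1 = (PySem.List.pyGetD coordenadas minimo (0, 0)).1 then
    if (PySem.List.pyGetD coordenadas i (0, 0)).2 > (PySem.List.pyGetD coordenadas minimo (0, 0)).2 then i
    else minimo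
  else if (PySem.List.pyGetD coordenadas i (0, 0)).1 < (PySem.List.pyGetD coordenadas minimo (0, 0)).1 then i
  else minimo

def coord_ext_esq (coordenadas : List (Int × Int)) (n : Int) : Int :=
  (PySem.List.pyRange 1 n 1).foldl (stepA coordenadas) 0

-- ===== PORT B =====
-- Loop body of B's second pass: state (best_i, best_y), update on strictly larger y among x = min_x.
def stepB (min_x : Int) (st : Int × Option Int) (ip : Int × (Int × Int)) : Int × Option Int :=
  if ip.2.1 == min_x && (match st.2 with | none => true | some b => decide (b < ip.2.2)) then
    (ip.1, some ip.2.2)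
  else st

def coord_ext_esq_alt (coordenadas : List (Int × Int)) (n : Int) : Int :=
  if n ≤ 1 then 0
  else
    let pts := PySem.List.slice coordenadas none (some n)
    let min_x := (PySem.List.min? (pts.map (fun p => p.1)) (fun x => x)).getD 0
    ((PySem.List.enumerate pts 0).foldl (stepB min_x) (0, none)).1

-- ===== PRECONDITION & SPEC =====
-- Pre_ excludes exactly the inputs where A raises IndexError: n ≥ 2 with fewer than n points.
def Pre_coord_ext_esq (coordenadas : List (Int × Int)) (n : Int) : Prop :=
  2 ≤ n → n ≤ (coordenadas.length : Int)
instance (coordenadas : List (Int × Int)) (n : Int) : Decidable (Pre_coord_ext_esq coordenadas n) := by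
  unfold Pre_coord_ext_esq; infer_instance

def pvWitness_coord_ext_esq : (List (Int × Int)) × Int := ([(3, 1), (1, 2), (1, 5), (2, 0)], 4)

def Spec_coord_ext_esq (coordenadas : List (Int × Int)) (n : Int) (out : Int) : Prop := out = coord_ext_esq_alt coordenadas n
instance (coordenadas : List (Int × Int)) (n : Int) (out : Int) : Decidable (Spec_coord_ext_esq coordenadas n out) := by unfold Spec_coord_ext_esq; infer_instance

-- ===== CLAIM (what is proved, stated in full; the proofs are below) =====
def Claim_equal_coord_ext_esq : Prop := ∀ (coordenadas : List (Int × Int)) (n : Int), Dom_coord_ext_esq coordenadas n → Pre_coord_ext_esq coordenadas n → Spec_coord_ext_esq coordenadas n (coord_ext_esq coordenadas n)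

-- ===== LEMMAS AND PROOFS =====

-- Strict "better point" order A minimises under: smaller x, tie broken by larger y.
def PtLt (p q : Int × Int) : Prop := p.1 < q.1 ∨ (p.1 = q.1 ∧ q.2 < p.2)

-- m is the index A is specified to return among the first t points of l:
-- no point of the prefix is strictly better, and m strictly beats every earlier index.
def GoodUpTo (l : List (Int × Int)) (t m : Nat) : Prop :=
  m < t ∧
  (∀ j < t, ¬ PtLt (l.getD j (0, 0)) (l.getD m (0, 0))) ∧
  (∀ j < m, PtLt (l.getD m (0, 0)) (l.getD j (0, 0)))

theorem goodUpTo_unique {l : List (Int × Int)} {t m m' : Nat}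
    (h : GoodUpTo l t m) (h' : GoodUpTo l t m') : m = m' := by
  rcases h with ⟨hm, hA, hB⟩
  rcases h' with ⟨hm', hA', hB'⟩
  rcases Nat.lt_trichotomy m m' with hlt | heq | hgt
  · exact absurd (hB' m hlt) (hA m' hm')
  · exact heq
  · exact absurd (hB m' hgt) (hA' m hm)

theorem stepA_good {l : List (Int × Int)} {t m : Nat}
    (hlen : t < l.length) (hg : GoodUpTo l t m) :
    ∃ m₂ : Nat, stepA l (m : Int) (t : Int) = (m₂ : Int) ∧ GoodUpTo l (t + 1) m₂ := by
  obtain ⟨hm, hA, hB⟩ := hg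
  simp only [stepA, PySem.List.pyGetD_natCast, gt_iff_lt]
  split_ifs with h1 h2 h3
  · -- equal x, strictly larger y: move to t
    refine ⟨t, rfl, by omega, ?_, ?_⟩
    · intro j hj
      rcases Nat.lt_succ_iff_lt_or_eq.mp hj with hj' | rfl
      · have := hA j hj'
        simp only [PtLt] at this ⊢
        omega
      · simp only [PtLt]; omega
    · intro j hj
      have := hA j hj
      simp only [PtLt] at this ⊢
      omega
  · -- equal x, y not larger: keep m
    refine ⟨m, rfl, by omega, ?_, hB⟩
    intro j hj
    rcases Nat.lt_succ_iff_lt_or_eq.mp hj with hj' | rfl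
    · exact hA j hj'
    · simp only [PtLt]; omega
  · -- strictly smaller x: move to t
    refine ⟨t, rfl, by omega, ?_, ?_⟩
    · intro j hj
      rcases Nat.lt_succ_iff_lt_or_eq.mp hj with hj' | rfl
      · have := hA j hj'
        simp only [PtLt] at this ⊢
        omega
      · simp only [PtLt]; omega
    · intro j hj
      have := hA j hj
      simp only [PtLt] at this ⊢
      omega
  · -- larger x: keep m
    refine ⟨m, rfl, by omega, ?_, hB⟩
    intro j hj
    rcases Nat.lt_succ_iff_lt_or_eq.mp hj with hj' | rfl
    · exact hA j hj'
    · simp only [PtLt]; omega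

theorem A_fold_good (l : List (Int × Int)) (N : Nat) (hlen : N ≤ l.length) :
    ∀ k : Nat, 1 + k ≤ N →
      ∃ m : Nat, (PySem.List.pyRange 1 (1 + (k : Int)) 1).foldl (stepA l) 0 = (m : Int) ∧
        GoodUpTo l (1 + k) m := by
  intro k
  induction k with
  | zero =>
    intro _
    refine ⟨0, ?_, ?_, ?_, ?_⟩
    · norm_num [PySem.List.pyRange_one_eq_nil]
    · omega
    · intro j hj
      interval_cases j
      simp only [PtLt]; omega
    · intro j hj; omega
  | succ k ih =>
    intro hk
    obtain ⟨m, hfold, hgood⟩ := ih (by omega)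
    have hsplit : PySem.List.pyRange 1 (1 + ((k : Int) + 1)) 1
        = PySem.List.pyRange 1 (1 + (k : Int)) 1 ++ [1 + (k : Int)] := by
      have h := PySem.List.pyRange_one_succ_right (a := 1) (b := 1 + (k : Int)) (by omega)
      rw [← h]
      ring_nf
    obtain ⟨m₂, hstep, hg₂⟩ := stepA_good (l := l) (t := 1 + k) (m := m) (by omega) hgood
    refine ⟨m₂, ?_, hg₂⟩
    push_cast
    push_cast at hsplit hstep hfold
    rw [hsplit, List.foldl_append, hfold]
    simpa using hstep

-- B-side invariant for the second pass after the first k points have been processed.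
def InvB (l : List (Int × Int)) (mx : Int) (k : Nat) (st : Int × Option Int) : Prop :=
  (st = (0, none) ∧ ∀ j < k, (l.getD j (0, 0)).1 ≠ mx) ∨
  (∃ b : Nat, b < k ∧ st = ((b : Int), some (l.getD b (0, 0)).2) ∧ (l.getD b (0, 0)).1 = mx ∧
    (∀ j < k, (l.getD j (0, 0)).1 = mx → (l.getD j (0, 0)).2 ≤ (l.getD b (0, 0)).2) ∧
    (∀ j < b, (l.getD j (0, 0)).1 ≠ mx ∨ (l.getD j (0, 0)).2 < (l.getD b (0, 0)).2))

theorem getD_take {l : List (Int × Int)} {N j : Nat} (hj : j < N) (hjl : j < l.length) :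
    (l.take N).getD j (0, 0) = l.getD j (0, 0) := by
  rw [List.getD_eq_getElem _ _ (by simp; omega), List.getD_eq_getElem _ _ hjl]
  simp [List.getElem_take]

theorem B_fold_inv (l : List (Int × Int)) (mx : Int) :
    ∀ (rest : List (Int × Int)) (k : Nat) (st : Int × Option Int),
      (∀ i : Nat, i < rest.length → rest.getD i (0, 0) = l.getD (k + i) (0, 0)) →
      InvB l mx k st →
      InvB l mx (k + rest.length) ((PySem.List.enumerate rest (k : Int)).foldl (stepB mx) st) := by
  intro rest
  induction rest with
  | nil => intro k st _ hinv; simpa [PySem.List.enumerate] using hinv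
  | cons x xs ih =>
    intro k st hrest hinv
    rw [PySem.List.enumerate_cons]
    have hx : x = l.getD k (0, 0) := by
      have := hrest 0 (by simp)
      simpa using this
    have hrest' : ∀ i : Nat, i < xs.length → xs.getD i (0, 0) = l.getD ((k + 1) + i) (0, 0) := by
      intro i hi
      have := hrest (i + 1) (by simp; omega)
      simp only [List.getD_cons_succ] at this
      rw [this, show k + (i + 1) = k + 1 + i from by omega]
    have hstep : InvB l mx (k + 1) (stepB mx st ((k : Int), x)) := by
      rcases hinv with ⟨hst, hnone⟩ | ⟨b, hb, hst, hbx, hmax, hearly⟩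
      · subst hst
        by_cases hxm : x.1 = mx
        · have hsb : stepB mx (0, none) ((k : Int), x) = ((k : Int), some x.2) := by
            simp [stepB, hxm]
          rw [hsb]
          refine Or.inr ⟨k, by omega, by rw [hx], by rw [← hx]; exact hxm, ?_, ?_⟩
          · intro j hj hjx
            rcases Nat.lt_succ_iff_lt_or_eq.mp hj with hj' | rfl
            · exact absurd hjx (hnone j hj')
            · rw [← hx]
          · intro j hj; exact Or.inl (hnone j hj)
        · have hsb : stepB mx (0, none) ((k : Int), x) = (0, none) := by
            simp [stepB, hxm]
          rw [hsb]
          refine Or.inl ⟨rfl, ?_⟩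
          intro j hj
          rcases Nat.lt_succ_iff_lt_or_eq.mp hj with hj' | rfl
          · exact hnone j hj'
          · rw [← hx]; exact hxm
      · subst hst
        by_cases hxm : x.1 = mx
        · by_cases hy : (l.getD b (0, 0)).2 < x.2
          · have hy' := hy
            simp only [List.getD] at hy'
            have hsb : stepB mx ((b : Int), some (l.getD b (0, 0)).2) ((k : Int), x)
                = ((k : Int), some x.2) := by
              simp [stepB, hxm, hy']
            rw [hsb]
            refine Or.inr ⟨k, by omega, by rw [hx], by rw [← hx]; exact hxm, ?_, ?_⟩
            · intro j hj hjx
              rcases Nat.lt_succ_iff_lt_or_eq.mp hj with hj' | rfl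
              · have := hmax j hj' hjx
                rw [← hx]; omega
              · rw [← hx]
            · intro j hj
              by_cases hjx : (l.getD j (0, 0)).1 = mx
              · have := hmax j hj hjx
                refine Or.inr ?_
                rw [← hx]; omega
              · exact Or.inl hjx
          · have hy' := hy
            simp only [List.getD] at hy'
            have hsb : stepB mx ((b : Int), some (l.getD b (0, 0)).2) ((k : Int), x)
                = ((b : Int), some (l.getD b (0, 0)).2) := by
              simp [stepB, hxm, hy']
            rw [hsb]
            refine Or.inr ⟨b, by omega, rfl, hbx, ?_, hearly⟩
            intro j hj hjx
            rcases Nat.lt_succ_iff_lt_or_eq.mp hj with hj' | rfl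
            · exact hmax j hj' hjx
            · rw [← hx]; omega
        · have hsb : stepB mx ((b : Int), some (l.getD b (0, 0)).2) ((k : Int), x)
              = ((b : Int), some (l.getD b (0, 0)).2) := by
            simp [stepB, hxm]
          rw [hsb]
          refine Or.inr ⟨b, by omega, rfl, hbx, ?_, hearly⟩
          intro j hj hjx
          rcases Nat.lt_succ_iff_lt_or_eq.mp hj with hj' | rfl
          · exact hmax j hj' hjx
          · exact absurd hjx (by rw [← hx]; exact hxm)
    simp only [List.length_cons]
    rw [show ((k : Int) + 1) = ((k + 1 : Nat) : Int) from by push_cast; ring,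
        show k + (xs.length + 1) = (k + 1) + xs.length from by omega]
    exact ih (k + 1) _ hrest' hstep

theorem B_good (l : List (Int × Int)) (n : Int) (h2 : 2 ≤ n)
    (hlen : n ≤ (l.length : Int)) :
    ∃ m : Nat, coord_ext_esq_alt l n = (m : Int) ∧ GoodUpTo l n.toNat m := by
  set N := n.toNat with hN
  have hNlen : N ≤ l.length := by omega
  have hN2 : 2 ≤ N := by omega
  have hslice : PySem.List.slice l none (some n) = l.take N := by
    rw [PySem.List.slice_to l (by omega)]
  set pts := l.take N with hpts
  have hptslen : pts.length = N := by simp [hpts]; omega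
  have hgetD : ∀ j : Nat, j < N → pts.getD j (0, 0) = l.getD j (0, 0) := by
    intro j hj; exact getD_take hj (by omega)
  -- the first pass returns some minimum
  have hne : pts.map (fun p => p.1) ≠ [] := by
    intro hcon
    have := congrArg List.length hcon
    simp [hptslen] at this
    omega
  obtain ⟨mx, hmx⟩ : ∃ mx, PySem.List.min? (pts.map (fun p => p.1)) (fun x => x) = some mx := by
    cases hmin : PySem.List.min? (pts.map (fun p => p.1)) (fun x => x) with
    | none => exact absurd ((PySem.List.min?_eq_none_iff _ _).mp hmin) hne
    | some v => exact ⟨v, rfl⟩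
  have hmx_le : ∀ j : Nat, j < N → mx ≤ (l.getD j (0, 0)).1 := by
    intro j hj
    have hmem : (l.getD j (0, 0)).1 ∈ pts.map (fun p => p.1) := by
      rw [← hgetD j hj, List.getD_eq_getElem _ _ (by omega)]
      exact List.mem_map_of_mem (List.getElem_mem _)
    exact PySem.List.min?_isMin hmx _ hmem
  have hmx_mem : ∃ j : Nat, j < N ∧ (l.getD j (0, 0)).1 = mx := by
    obtain ⟨p, hp, hpe⟩ := List.mem_map.mp (PySem.List.min?_mem hmx)
    obtain ⟨j, hj, hje⟩ := List.getElem_of_mem hp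
    refine ⟨j, by omega, ?_⟩
    rw [← hgetD j (by omega), List.getD_eq_getElem _ _ hj, hje]
    exact hpe
  -- the second pass
  have hinv := B_fold_inv l mx pts 0 (0, none)
    (by intro i hi; simpa using hgetD i (by omega))
    (Or.inl ⟨rfl, by omega⟩)
  rw [hptslen] at hinv
  simp only [Nat.cast_zero, Nat.zero_add] at hinv
  rcases hinv with ⟨hst, hnone⟩ | ⟨b, hb, hst, hbx, hmax, hearly⟩
  · obtain ⟨j, hj, hje⟩ := hmx_mem
    exact absurd hje (hnone j hj)
  · refine ⟨b, ?_, by omega, ?_, ?_⟩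
    · unfold coord_ext_esq_alt
      rw [if_neg (by omega)]
      simp only [hslice, hmx, Option.getD_some]
      rw [hst]
    · intro j hj
      have h1 := hmx_le j hj
      have h2 := hmax j hj
      simp only [PtLt]
      rw [hbx]
      by_cases hjx : (l.getD j (0, 0)).1 = mx
      · have := h2 hjx
        omega
      · omega
    · intro j hj
      have h1 := hmx_le j (by omega)
      have h2 := hearly j hj
      simp only [PtLt]
      rw [hbx]
      rcases h2 with h2 | h2
      · omega
      · omega

-- ===== VERDICT (by name: the statement is the Claim_ definition above) =====
theorem coord_ext_esq_spec : Claim_equal_coord_ext_esq := by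
  intro l n _ hpre
  unfold Spec_coord_ext_esq
  by_cases hn : n ≤ 1
  · unfold coord_ext_esq coord_ext_esq_alt
    rw [if_pos hn, PySem.List.pyRange_one_eq_nil (by omega)]
    simp
  · have h2 : 2 ≤ n := by omega
    have hlen := hpre h2
    obtain ⟨mB, hB, hgB⟩ := B_good l n h2 hlen
    have hNn : (1 : Int) + ((n.toNat - 1 : Nat) : Int) = n := by omega
    obtain ⟨mA, hA, hgA⟩ := A_fold_good l n.toNat (by omega) (n.toNat - 1) (by omega)
    have : coord_ext_esq l n = (mA : Int) := by
      unfold coord_ext_esq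
      rw [← hNn]
      exact hA
    rw [this, hB]
    have hNt : 1 + (n.toNat - 1) = n.toNat := by omega
    rw [hNt] at hgA
    exact congrArg _ (goodUpTo_unique hgA hgB)
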